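-- pv_equiv track=rewrite | github.com/kimtk94/test1 | kmer.py | mer
-- ===== SOURCE A (Python) =====
-- def mer(l1, l2, n):
--     if n==1:
--         return l2
--     ltmp = []
--     for s1 in l1:
--         for s2 in l2:
--             ltmp.append(s1 + s2)
--
--     return mer(l1, ltmp, n-1)
-- ===== SOURCE B (Python) =====
-- def mer(l1, l2, n):
--     result = l2
--     while n != 1:
--         result = [a + x for a in l1 for x in result]
--         n -= 1
--     return result
-- ===== Notes on version B (the rewrite author's own statement) =====
-- stated objective: simpler
-- what changed: Replaces A's tail recursion with nested append loops by an iterative while-loop that rebuilds the list with one flat comprehension per level.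
import Mathlib
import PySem

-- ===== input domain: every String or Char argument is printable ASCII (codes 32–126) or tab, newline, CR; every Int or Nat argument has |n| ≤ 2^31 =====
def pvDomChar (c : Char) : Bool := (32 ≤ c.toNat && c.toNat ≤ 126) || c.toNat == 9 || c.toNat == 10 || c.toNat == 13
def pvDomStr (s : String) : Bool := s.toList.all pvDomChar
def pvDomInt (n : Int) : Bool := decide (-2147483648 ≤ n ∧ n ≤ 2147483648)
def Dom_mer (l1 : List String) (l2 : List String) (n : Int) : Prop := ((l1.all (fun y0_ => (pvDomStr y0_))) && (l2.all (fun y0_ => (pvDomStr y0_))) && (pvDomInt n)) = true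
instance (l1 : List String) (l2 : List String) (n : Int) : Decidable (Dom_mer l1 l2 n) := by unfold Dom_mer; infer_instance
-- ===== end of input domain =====

-- B replaces A's tail recursion (nested append loops per level) by an iterative
-- while-loop with one flat comprehension per level (objective: simpler).

-- ===== PORT A =====
-- Python A recurses with n-1 until n == 1; for n < 1 it diverges (RecursionError),
-- which Pre_mer excludes; the `n < 1` guard below only ensures totality there.
def mer (l1 : List String) (l2 : List String) (n : Int) : List String :=
  if n = 1 then l2
  else if n < 1 then []   -- Python diverges here; outside Pre_mer
  else
    mer l1 (l1.foldl (fun ltmp s1 => l2.foldl (fun ltmp s2 => ltmp ++ [s1 ++ s2]) ltmp) []) (n - 1)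
termination_by n.toNat
decreasing_by omega

-- ===== PORT B =====
-- the while-loop of Source B, with fuel (n-1).toNat = number of iterations (Python
-- diverges when n < 1, outside Pre_mer)
def merLoop (l1 : List String) (res : List String) : Nat → List String
  | 0 => res
  | k + 1 => merLoop l1 (l1.flatMap (fun a => res.map (fun x => a ++ x))) k

def mer_alt (l1 : List String) (l2 : List String) (n : Int) : List String :=
  merLoop l1 l2 (n - 1).toNat

-- ===== PRECONDITION & SPEC =====
-- Pre_mer excludes n < 1, on which both Pythons diverge (A by unbounded recursion).
def Pre_mer (l1 : List String) (l2 : List String) (n : Int) : Prop := 1 ≤ n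
instance (l1 : List String) (l2 : List String) (n : Int) : Decidable (Pre_mer l1 l2 n) := by unfold Pre_mer; infer_instance
def pvWitness_mer : List String × List String × Int := (["a", "b"], ["c", "d"], 3)

def Spec_mer (l1 : List String) (l2 : List String) (n : Int) (out : List String) : Prop := out = mer_alt l1 l2 n
instance (l1 : List String) (l2 : List String) (n : Int) (out : List String) : Decidable (Spec_mer l1 l2 n out) := by unfold Spec_mer; infer_instance

-- ===== CLAIM =====
def Claim_equal_mer : Prop := ∀ (l1 : List String) (l2 : List String) (n : Int), Dom_mer l1 l2 n → Pre_mer l1 l2 n → Spec_mer l1 l2 n (mer l1 l2 n)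

-- ===== LEMMAS AND PROOFS =====
theorem foldl_inner (s1 : String) (l2 : List String) (acc : List String) :
    l2.foldl (fun ltmp s2 => ltmp ++ [s1 ++ s2]) acc = acc ++ l2.map (fun x => s1 ++ x) := by
  induction l2 generalizing acc with
  | nil => simp
  | cons h t ih => simp [List.foldl, ih]

theorem foldl_outer (l1 l2 : List String) (acc : List String) :
    l1.foldl (fun ltmp s1 => l2.foldl (fun ltmp s2 => ltmp ++ [s1 ++ s2]) ltmp) acc
      = acc ++ l1.flatMap (fun a => l2.map (fun x => a ++ x)) := by
  induction l1 generalizing acc with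
  | nil => simp
  | cons h t ih =>
    rw [List.foldl_cons, foldl_inner, ih, List.flatMap_cons, List.append_assoc]

theorem mer_eq_loop (l1 : List String) : ∀ (k : Nat) (l2 : List String) (n : Int),
    1 ≤ n → (n - 1).toNat = k → mer l1 l2 n = merLoop l1 l2 k := by
  intro k
  induction k with
  | zero =>
    intro l2 n h1 hk
    have hn : n = 1 := by omega
    subst hn
    simp [mer, merLoop]
  | succ k ih =>
    intro l2 n h1 hk
    have hn1 : ¬ n = 1 := by omega
    have hn2 : ¬ n < 1 := by omega
    rw [mer]
    simp only [hn1, hn2, if_false]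
    rw [foldl_outer, List.nil_append, merLoop]
    exact ih _ (n - 1) (by omega) (by omega)

-- ===== VERDICT =====
theorem mer_spec : Claim_equal_mer := by
  intro l1 l2 n _ hpre
  unfold Spec_mer mer_alt
  exact mer_eq_loop l1 (n - 1).toNat l2 n hpre rfl
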